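-- pv_equiv track=rewrite | github.com/Trade-AI-Lab/Stats_Crypto | src/utils/data_checks.py | sort_download_data
-- ===== SOURCE A (Python) =====
-- def sort_download_data(data):
--     # Initialize sets to avoid duplicates
--     currencies_set = set()
--     periods_set = set()
--     broker_set = set()
--
--     # Populate the sets with unique currencies and periods
--     # Assume there only is one broker here.
--     for broker, crypto, period in data:
--         currencies_set.add(crypto)
--         periods_set.add(period)
--         broker_set.add(broker)
--
--     # Convert sets to sorted lists
--     currencies_list = sorted(currencies_set)
--     periods_list = sorted(periods_set)
--     broker_list = sorted(broker_set)
--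
--     return currencies_list, periods_list, broker_list
-- ===== SOURCE B (Python) =====
-- def sort_download_data(data):
--     # Sort-based dedup: sort each full column, then drop adjacent duplicates
--     # in one scan (no sets involved).
--     def _uniq(ys):
--         out = []
--         for v in ys:
--             if not out or out[-1] != v:
--                 out.append(v)
--         return out
--
--     currencies_list = _uniq(sorted(crypto for _b, crypto, _p in data))
--     periods_list = _uniq(sorted(period for _b, _c, period in data))
--     broker_list = _uniq(sorted(broker for broker, _c, _p in data))
--     return currencies_list, periods_list, broker_list
-- ===== Notes on version B (the rewrite author's own statement) =====
-- stated objective: alternative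
-- what changed: B deduplicates by sorting each full column and then removing adjacent duplicates in a single linear scan, instead of A's hash-set accumulation per row followed by sorting the unique values.
import Mathlib
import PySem

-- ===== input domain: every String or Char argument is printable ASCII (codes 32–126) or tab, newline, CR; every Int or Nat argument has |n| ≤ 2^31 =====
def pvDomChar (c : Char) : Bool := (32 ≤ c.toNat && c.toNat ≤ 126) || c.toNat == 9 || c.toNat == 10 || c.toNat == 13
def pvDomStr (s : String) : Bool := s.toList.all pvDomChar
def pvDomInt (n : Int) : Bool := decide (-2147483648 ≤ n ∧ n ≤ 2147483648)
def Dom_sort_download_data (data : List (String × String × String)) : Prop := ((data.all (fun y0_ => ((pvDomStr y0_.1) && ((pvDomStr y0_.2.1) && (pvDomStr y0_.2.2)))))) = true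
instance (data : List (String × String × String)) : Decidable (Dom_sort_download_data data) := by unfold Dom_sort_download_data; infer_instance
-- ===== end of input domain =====

-- B deduplicates by sorting each full column and removing adjacent duplicates in a
-- single scan, instead of A's hash-set accumulation followed by sorting the uniques (alternative algorithm).

-- ===== PORT A =====
-- the row loop: three set accumulators filled per tuple, then each sorted
def sort_download_data (data : List (String × String × String)) : List String × List String × List String :=
  let z := data.foldl
    (fun acc t =>
      (PySem.Set.add acc.1 t.2.1, PySem.Set.add acc.2.1 t.2.2, PySem.Set.add acc.2.2 t.1))
    (PySem.Set.empty, PySem.Set.empty, PySem.Set.empty)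
  (PySem.List.sorted z.1 (fun x => x) false,
   PySem.List.sorted z.2.1 (fun x => x) false,
   PySem.List.sorted z.2.2 (fun x => x) false)

-- ===== PORT B =====
-- _uniq: the loop 'for v in ys: if not out or out[-1] != v: out.append(v)';
-- 'out[-1]' on the nonempty out is out.getLast?
def pvUniq (ys : List String) : List String :=
  ys.foldl (fun out v => if out = [] ∨ out.getLast? ≠ some v then out ++ [v] else out) []

-- sort each column, then drop adjacent duplicates
def sort_download_data_alt (data : List (String × String × String)) : List String × List String × List String :=
  let currencies_list := pvUniq (PySem.List.sorted (data.map (fun t => t.2.1)) (fun x => x) false)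
  let periods_list := pvUniq (PySem.List.sorted (data.map (fun t => t.2.2)) (fun x => x) false)
  let broker_list := pvUniq (PySem.List.sorted (data.map (fun t => t.1)) (fun x => x) false)
  (currencies_list, periods_list, broker_list)

-- ===== PRECONDITION & SPEC =====
def Spec_sort_download_data (data : List (String × String × String)) (out : List String × List String × List String) : Prop := out = sort_download_data_alt data
instance (data : List (String × String × String)) (out : List String × List String × List String) : Decidable (Spec_sort_download_data data out) := by unfold Spec_sort_download_data; infer_instance

-- ===== CLAIM =====
def Claim_equal_sort_download_data : Prop := ∀ (data : List (String × String × String)), Dom_sort_download_data data → Spec_sort_download_data data (sort_download_data data)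

-- ===== LEMMAS AND PROOFS =====
-- A's triple fold splits into three column folds
theorem pv_fold_split (data : List (String × String × String))
    (cs ps bs : PySem.Set String) :
    data.foldl
      (fun acc t =>
        (PySem.Set.add acc.1 t.2.1, PySem.Set.add acc.2.1 t.2.2, PySem.Set.add acc.2.2 t.1))
      (cs, ps, bs)
    = ((data.map (fun t => t.2.1)).foldl PySem.Set.add cs,
       (data.map (fun t => t.2.2)).foldl PySem.Set.add ps,
       (data.map (fun t => t.1)).foldl PySem.Set.add bs) := by
  induction data generalizing cs ps bs with
  | nil => simp
  | cons h t ih => simp [ih]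

-- adjacent dedup after a kept element p (proof-side recursion equal to pvUniq's fold)
def pvUniqFrom (p : String) : List String → List String
  | [] => []
  | v :: t => if v = p then pvUniqFrom p t else v :: pvUniqFrom v t

theorem pvUniq_fold_eq (ys zs : List String) (x : String) :
    ys.foldl (fun out v => if out = [] ∨ out.getLast? ≠ some v then out ++ [v] else out) (zs ++ [x])
    = (zs ++ [x]) ++ pvUniqFrom x ys := by
  induction ys generalizing zs x with
  | nil => simp [pvUniqFrom]
  | cons v t ih =>
    by_cases h : v = x
    · subst h
      simp [List.foldl_cons, pvUniqFrom, ih]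
    · have : (zs ++ [x]).getLast? = some x := by simp
      simp only [List.foldl_cons, pvUniqFrom, this]
      rw [if_pos (by simp [Ne.symm h]), if_neg h]
      have := ih (zs ++ [x]) v
      simpa [List.append_assoc] using this

theorem mem_pvUniqFrom (p : String) (ys : List String) {z : String}
    (h : z ∈ pvUniqFrom p ys) : z ∈ ys := by
  induction ys generalizing p with
  | nil => simp [pvUniqFrom] at h
  | cons v t ih =>
    by_cases hv : v = p
    · simp [pvUniqFrom, hv] at h
      exact List.mem_cons_of_mem _ (ih p h)
    · simp [pvUniqFrom, hv] at h
      rcases h with h | h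
      · simp [h]
      · exact List.mem_cons_of_mem _ (ih v h)

theorem mem_pvUniqFrom_of_mem (p : String) (ys : List String) {z : String}
    (h : z ∈ ys) : z = p ∨ z ∈ pvUniqFrom p ys := by
  induction ys generalizing p with
  | nil => simp at h
  | cons v t ih =>
    by_cases hv : v = p
    · rcases List.mem_cons.mp h with h | h
      · exact Or.inl (h.trans hv)
      · simpa [pvUniqFrom, hv] using ih p h
    · rcases List.mem_cons.mp h with h | h
      · exact Or.inr (by simp [pvUniqFrom, hv, h])
      · rcases ih v h with h' | h'
        · exact Or.inr (by simp [pvUniqFrom, hv, h'])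
        · exact Or.inr (by simp [pvUniqFrom, hv]; exact Or.inr h')

theorem pvUniqFrom_pairwise (p : String) (ys : List String)
    (hch : ys.Pairwise (· ≤ ·)) (hp : ∀ y ∈ ys, p ≤ y) :
    (pvUniqFrom p ys).Pairwise (· < ·) ∧ ∀ z ∈ pvUniqFrom p ys, p < z := by
  induction ys generalizing p with
  | nil => simp [pvUniqFrom]
  | cons v t ih =>
    rcases List.pairwise_cons.mp hch with ⟨hv, ht⟩
    by_cases hvp : v = p
    · have := ih p ht (fun y hy => le_trans (hp v (by simp)) (hv y hy))
      simpa [pvUniqFrom, hvp] using this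
    · have hpv : p < v := lt_of_le_of_ne (hp v (by simp)) (fun e => hvp e.symm)
      have := ih v ht hv
      refine ⟨?_, ?_⟩
      · simp only [pvUniqFrom, if_neg hvp]
        exact List.pairwise_cons.mpr ⟨this.2, this.1⟩
      · intro z hz
        simp only [pvUniqFrom, if_neg hvp, List.mem_cons] at hz
        rcases hz with hz | hz
        · exact hz ▸ hpv
        · exact lt_trans hpv (this.2 z hz)

-- the core: sorted(set(xs)) = adjacent-dedup of sorted(xs)
theorem pv_sorted_set_eq_uniq (xs : List String) :
    PySem.List.sorted (PySem.Set.ofList xs) (fun x => x) false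
      = pvUniq (PySem.List.sorted xs (fun x => x) false) := by
  cases hs : PySem.List.sorted xs (fun x => x) false with
  | nil =>
    have hxs : xs = [] := (PySem.List.sorted_eq_nil_iff _ _ _).mp hs
    simp [hxs, pvUniq, PySem.Set.ofList]
    exact (PySem.List.sorted_eq_nil_iff _ _ _).mpr rfl
  | cons v t =>
    have hpair : (v :: t).Pairwise (fun a b => a ≤ b) := by
      have := PySem.List.sorted_pairwise xs (fun x => x)
      rw [hs] at this
      simpa using this
    rcases List.pairwise_cons.mp hpair with ⟨hv, ht⟩
    have huf := pvUniqFrom_pairwise v t ht hv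
    have hys : pvUniq (v :: t) = v :: pvUniqFrom v t := by
      show List.foldl _ ([] ++ [v]) t = _
      rw [pvUniq_fold_eq]
      simp
    rw [hys]
    -- membership of the dedup list
    have hmem : ∀ z, z ∈ v :: pvUniqFrom v t ↔ z ∈ PySem.Set.ofList xs := by
      intro z
      have hmx : z ∈ v :: t ↔ z ∈ xs := by
        rw [← hs]; exact PySem.List.mem_sorted _ _ _ _
      constructor
      · intro hz
        rcases List.mem_cons.mp hz with hz | hz
        · exact (PySem.Set.mem_ofList _ _).mpr (hmx.mp (hz ▸ List.mem_cons_self))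
        · exact (PySem.Set.mem_ofList _ _).mpr
            (hmx.mp (List.mem_cons_of_mem _ (mem_pvUniqFrom v t hz)))
      · intro hz
        have hzx : z ∈ v :: t := hmx.mpr ((PySem.Set.mem_ofList _ _).mp hz)
        rcases List.mem_cons.mp hzx with hz' | hz'
        · simp [hz']
        · rcases mem_pvUniqFrom_of_mem v t hz' with h | h
          · simp [h]
          · exact List.mem_cons_of_mem _ h
    have hlt : (v :: pvUniqFrom v t).Pairwise (· < ·) :=
      List.pairwise_cons.mpr ⟨huf.2, huf.1⟩
    have hnd : (v :: pvUniqFrom v t).Nodup := hlt.imp (fun h => ne_of_lt h)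
    have hperm : (v :: pvUniqFrom v t).Perm (PySem.Set.ofList xs) :=
      (List.perm_ext_iff_of_nodup hnd (PySem.Set.nodup_ofList xs)).mpr hmem
    exact PySem.List.sorted_eq_of_perm_of_pairwise_lt _ _ _ hperm (by simpa using hlt)

-- ===== VERDICT =====
theorem sort_download_data_spec : Claim_equal_sort_download_data := by
  intro data _
  unfold Spec_sort_download_data sort_download_data sort_download_data_alt
  simp only [pv_fold_split, PySem.Set.empty, ← PySem.Set.ofList_eq_foldl,
    pv_sorted_set_eq_uniq]
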